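-- pv_equiv track=rewrite | github.com/LeSaintRizBleu/AOC_2023 | d3/d3_p2.py | isGear
-- ===== SOURCE A (Python) =====
-- def isGear(t, row, col):
--     if(t[row][col]=="*"):
--         x = 0
--         for i in range(row - 1, row + 2):
--             ok = True
--             for j in range(col - 1, col + 2):
--                 if 0 <= i < len(t) and 0 <= j < len(t[i]):
--                     if t[i][j].isdigit():
--                         if ok:
--                             x += 1
--                             ok = False
--                     else : ok = True
--         return x==2
--     return False
-- ===== SOURCE B (Python) =====
-- def isGear(t, row, col):
--     if t[row][col] != "*":
--         return False
--
--     def d(i, j):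
--         return 0 <= i < len(t) and 0 <= j < len(t[i]) and t[i][j].isdigit()
--
--     # number of adjacent numbers = digit cells in the window minus horizontal
--     # digit-digit links inside it (runs = vertices - edges of a path)
--     cells = sum(d(i, j) for i in (row - 1, row, row + 1)
--                         for j in (col - 1, col, col + 1))
--     links = sum(d(i, j) and d(i, j + 1) for i in (row - 1, row, row + 1)
--                                         for j in (col - 1, col))
--     return cells - links == 2
-- ===== Notes on version B (the rewrite author's own statement) =====
-- stated objective: alternative
-- what changed: Replaces A's stateful ok-flag run-scanner over the 3x3 window with a stateless inclusion-exclusion count: adjacent numbers = digit cells in the window minus horizontal digit-digit links (runs = vertices - edges of a path), computed by two closed-form sums over a pure neighbourhood predicate.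
import Mathlib
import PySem

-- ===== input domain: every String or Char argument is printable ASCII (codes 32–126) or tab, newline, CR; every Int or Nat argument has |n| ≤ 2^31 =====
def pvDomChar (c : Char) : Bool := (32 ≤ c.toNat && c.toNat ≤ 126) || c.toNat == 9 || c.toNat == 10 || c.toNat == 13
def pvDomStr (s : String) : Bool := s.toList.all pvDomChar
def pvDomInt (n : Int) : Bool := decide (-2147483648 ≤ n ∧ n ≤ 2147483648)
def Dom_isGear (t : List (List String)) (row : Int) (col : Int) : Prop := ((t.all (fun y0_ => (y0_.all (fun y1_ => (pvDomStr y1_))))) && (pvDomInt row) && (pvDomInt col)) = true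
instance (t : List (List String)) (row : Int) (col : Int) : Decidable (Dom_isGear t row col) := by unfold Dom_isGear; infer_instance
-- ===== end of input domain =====

-- B replaces A's stateful ok-flag run scan of the 3x3 window by a stateless inclusion-exclusion
-- count (digit cells minus horizontal digit-digit links); alternative algorithm, same cost.

-- ===== PORT A =====
def isGear (t : List (List String)) (row : Int) (col : Int) : Bool :=
  match PySem.List.pyGet? t row with
  | none => false  -- IndexError in Python; excluded by Pre_
  | some r =>
    match PySem.List.pyGet? r col with
    | none => false  -- IndexError in Python; excluded by Pre_
    | some c0 =>
      if c0 = "*" then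
        let x : Int := (PySem.List.pyRange (row - 1) (row + 2) 1).foldl (fun x i =>
          ((PySem.List.pyRange (col - 1) (col + 2) 1).foldl (fun (p : Int × Bool) j =>
            if 0 ≤ i ∧ i < (t.length : Int) then
              if 0 ≤ j ∧ j < (((PySem.List.pyGet? t i).getD []).length : Int) then
                if PySem.Str.strIsdigit ((PySem.List.pyGet? ((PySem.List.pyGet? t i).getD []) j).getD "") then
                  if p.2 then (p.1 + 1, false) else (p.1, false)
                else (p.1, true)
              else p
            else p) (x, true)).1) 0
        decide (x = 2)
      else false

-- ===== PORT B =====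
-- B's helper d(i, j): cell (i, j) exists (guarded access, as in Source B) and is a digit string
def pvDigit (t : List (List String)) (i : Int) (j : Int) : Bool :=
  decide (0 ≤ i ∧ i < (t.length : Int)) &&
  decide (0 ≤ j ∧ j < (((PySem.List.pyGet? t i).getD []).length : Int)) &&
  PySem.Str.strIsdigit ((PySem.List.pyGet? ((PySem.List.pyGet? t i).getD []) j).getD "")

def isGear_alt (t : List (List String)) (row : Int) (col : Int) : Bool :=
  match PySem.List.pyGet? t row with
  | none => false  -- IndexError in Python; excluded by Pre_
  | some r =>
    match PySem.List.pyGet? r col with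
    | none => false  -- IndexError in Python; excluded by Pre_
    | some c0 =>
      if c0 ≠ "*" then false
      else
        let cells : Int := (([row - 1, row, row + 1].flatMap (fun i =>
          [col - 1, col, col + 1].map (fun j => pvDigit t i j))).map
            (fun b => if b then (1 : Int) else 0)).sum
        let links : Int := (([row - 1, row, row + 1].flatMap (fun i =>
          [col - 1, col].map (fun j => pvDigit t i j && pvDigit t i (j + 1)))).map
            (fun b => if b then (1 : Int) else 0)).sum
        decide (cells - links = 2)

-- ===== PRECONDITION & SPEC =====
-- Pre_ excludes exactly the inputs where Python A raises IndexError on t[row][col].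
def Pre_isGear (t : List (List String)) (row : Int) (col : Int) : Prop :=
  PySem.Raise.InRange t.length row ∧
  PySem.Raise.InRange ((PySem.List.pyGet? t row).getD []).length col
instance (t : List (List String)) (row : Int) (col : Int) : Decidable (Pre_isGear t row col) := by
  unfold Pre_isGear; infer_instance
def pvWitness_isGear : List (List String) × Int × Int :=
  ([["1", "2", "."], [".", "*", "."], [".", "3", "."]], 1, 1)

def Spec_isGear (t : List (List String)) (row : Int) (col : Int) (out : Bool) : Prop := out = isGear_alt t row col
instance (t : List (List String)) (row : Int) (col : Int) (out : Bool) : Decidable (Spec_isGear t row col out) := by unfold Spec_isGear; infer_instance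

-- ===== CLAIM (what is proved, stated in full; the proofs are below) =====
def Claim_equal_isGear : Prop := ∀ (t : List (List String)) (row : Int) (col : Int), Dom_isGear t row col → Pre_isGear t row col → Spec_isGear t row col (isGear t row col)

-- ===== LEMMAS AND PROOFS =====

-- abstract semantics of A's inner-loop body on one cell: r = cell in range, d = cell is a digit
def pvStep (r d : Bool) (p : Int × Bool) : Int × Bool :=
  if r then (if d then (if p.2 then (p.1 + 1, false) else (p.1, false)) else (p.1, true)) else p

-- three steps from ok = true count runs = cells − links, unless an out-of-range cell sits
-- strictly between two in-range ones (impossible for a real row; excluded by h)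
theorem pvStep3 (r1 d1 r2 d2 r3 d3 : Bool) (x : Int)
    (h : ¬(r1 = true ∧ r2 = false ∧ r3 = true)) :
    (pvStep r3 d3 (pvStep r2 d2 (pvStep r1 d1 (x, true)))).1
      = x + ((if r1 && d1 then (1:Int) else 0) + (if r2 && d2 then 1 else 0) + (if r3 && d3 then 1 else 0))
          - ((if (r1 && d1) && (r2 && d2) then (1:Int) else 0) + (if (r2 && d2) && (r3 && d3) then 1 else 0)) := by
  cases r1 <;> cases d1 <;> cases r2 <;> cases d2 <;> cases r3 <;> cases d3 <;>
    simp_all [pvStep] <;> omega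

theorem pyRange3 (c : Int) : PySem.List.pyRange (c - 1) (c + 2) 1 = [c - 1, c, c + 1] := by
  rw [PySem.List.pyRange_one_cons (by omega), PySem.List.pyRange_one_cons (by omega),
      PySem.List.pyRange_one_cons (by omega), PySem.List.pyRange_one_eq_nil (by omega)]
  norm_num

-- A's inner loop over one window row adds exactly B's cells − links for that row
theorem row_cnt (t : List (List String)) (i c : Int) (x : Int) :
  (([c - 1, c, c + 1] : List Int).foldl (fun (p : Int × Bool) j =>
      if 0 ≤ i ∧ i < (t.length : Int) then
        if 0 ≤ j ∧ j < (((PySem.List.pyGet? t i).getD []).length : Int) then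
          if PySem.Str.strIsdigit ((PySem.List.pyGet? ((PySem.List.pyGet? t i).getD []) j).getD "") then
            if p.2 then (p.1 + 1, false) else (p.1, false)
          else (p.1, true)
        else p
      else p) (x, true)).1
  = x + ((if pvDigit t i (c-1) then (1:Int) else 0) + (if pvDigit t i c then 1 else 0) + (if pvDigit t i (c+1) then 1 else 0))
      - ((if pvDigit t i (c-1) && pvDigit t i c then (1:Int) else 0) + (if pvDigit t i c && pvDigit t i (c+1) then 1 else 0)) := by
  by_cases hI : 0 ≤ i ∧ i < (t.length : Int)
  · have hstep : (fun (p : Int × Bool) (j : Int) =>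
        if 0 ≤ i ∧ i < (t.length : Int) then
          if 0 ≤ j ∧ j < (((PySem.List.pyGet? t i).getD []).length : Int) then
            if PySem.Str.strIsdigit ((PySem.List.pyGet? ((PySem.List.pyGet? t i).getD []) j).getD "") then
              if p.2 then (p.1 + 1, false) else (p.1, false)
            else (p.1, true)
          else p
        else p)
        = (fun (p : Int × Bool) (j : Int) =>
            pvStep (decide (0 ≤ j ∧ j < (((PySem.List.pyGet? t i).getD []).length : Int)))
                 (PySem.Str.strIsdigit ((PySem.List.pyGet? ((PySem.List.pyGet? t i).getD []) j).getD "")) p) := by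
      funext p j
      simp [pvStep, hI]
    rw [hstep]
    simp only [List.foldl]
    rw [pvStep3]
    · simp [pvDigit, hI]
    · simp only [decide_eq_true_eq, decide_eq_false_iff_not]
      rintro ⟨⟨h1a, h1b⟩, h2, ⟨h3a, h3b⟩⟩
      exact h2 ⟨by omega, by omega⟩
  · simp only [List.foldl, hI, if_false, pvDigit, decide_false, Bool.false_and, Bool.and_false]
    norm_num

-- A's x over the whole 3x3 window equals B's cells − links
theorem x_eq (t : List (List String)) (row col : Int) :
    (PySem.List.pyRange (row - 1) (row + 2) 1).foldl (fun x i =>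
          ((PySem.List.pyRange (col - 1) (col + 2) 1).foldl (fun (p : Int × Bool) j =>
            if 0 ≤ i ∧ i < (t.length : Int) then
              if 0 ≤ j ∧ j < (((PySem.List.pyGet? t i).getD []).length : Int) then
                if PySem.Str.strIsdigit ((PySem.List.pyGet? ((PySem.List.pyGet? t i).getD []) j).getD "") then
                  if p.2 then (p.1 + 1, false) else (p.1, false)
                else (p.1, true)
              else p
            else p) (x, true)).1) 0
    = (([row - 1, row, row + 1].flatMap (fun i =>
          [col - 1, col, col + 1].map (fun j => pvDigit t i j))).map
            (fun b => if b then (1 : Int) else 0)).sum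
      - (([row - 1, row, row + 1].flatMap (fun i =>
          [col - 1, col].map (fun j => pvDigit t i j && pvDigit t i (j + 1)))).map
            (fun b => if b then (1 : Int) else 0)).sum := by
  simp only [pyRange3]
  simp only [row_cnt]
  simp only [List.foldl]
  simp [List.flatMap]
  ring

theorem isGear_eq_alt (t : List (List String)) (row col : Int)
    (hpre : Pre_isGear t row col) :
    isGear t row col = isGear_alt t row col := by
  obtain ⟨h1, h2⟩ := hpre
  rcases hr : PySem.List.pyGet? t row with _ | r
  · exact absurd h1 ((PySem.List.pyGet?_eq_none_iff _ _).mp hr)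
  rw [hr] at h2; simp only [Option.getD_some] at h2
  rcases hc : PySem.List.pyGet? r col with _ | c0
  · exact absurd h2 ((PySem.List.pyGet?_eq_none_iff _ _).mp hc)
  simp only [isGear, isGear_alt, hr, hc]
  by_cases hstar : c0 = "*"
  · simp only [hstar, ne_eq, not_true_eq_false, if_true, if_false, x_eq]
  · simp [hstar]

-- ===== VERDICT (by name: the statement is the Claim_ definition above) =====
theorem isGear_spec : Claim_equal_isGear := by
  intro t row col _ hpre
  exact isGear_eq_alt t row col hpre
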